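-- pv_equiv track=rewrite | github.com/friveroll/advent-of-code-2022 | 06-Tuning_Trouble/aoc202206.py | find_start_of_packet
-- ===== SOURCE A (Python) =====
-- def find_start_of_packet(datastream, packet_size):
--     last_n_chars = []
--     for index, char in enumerate(datastream):
--         last_n_chars.append(char)
--         if len(last_n_chars) > packet_size:
--             last_n_chars.pop(0)
--         if len(set(last_n_chars)) == packet_size:
--             return index + 1
--     return -1
-- ===== SOURCE B (Python) =====
-- def find_start_of_packet(datastream, packet_size):
--     counts = {}
--     for index, char in enumerate(datastream):
--         counts[char] = counts.get(char, 0) + 1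
--         if index >= packet_size:
--             gone = datastream[index - packet_size]
--             counts[gone] -= 1
--             if counts[gone] == 0:
--                 del counts[gone]
--         if len(counts) == packet_size:
--             return index + 1
--     return -1
-- ===== Notes on version B (the rewrite author's own statement) =====
-- stated objective: faster
-- what changed: Replaces the per-step window-list copy and set() rebuild with an incremental sliding-window character frequency dict (len(counts) = distinct count), updated in O(1) per character.
-- outside the precondition, e.g. on find_start_of_packet('ab', -1): A returns -1, B raises KeyError; on find_start_of_packet('a', -1): A returns -1, B raises IndexError
import Mathlib
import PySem

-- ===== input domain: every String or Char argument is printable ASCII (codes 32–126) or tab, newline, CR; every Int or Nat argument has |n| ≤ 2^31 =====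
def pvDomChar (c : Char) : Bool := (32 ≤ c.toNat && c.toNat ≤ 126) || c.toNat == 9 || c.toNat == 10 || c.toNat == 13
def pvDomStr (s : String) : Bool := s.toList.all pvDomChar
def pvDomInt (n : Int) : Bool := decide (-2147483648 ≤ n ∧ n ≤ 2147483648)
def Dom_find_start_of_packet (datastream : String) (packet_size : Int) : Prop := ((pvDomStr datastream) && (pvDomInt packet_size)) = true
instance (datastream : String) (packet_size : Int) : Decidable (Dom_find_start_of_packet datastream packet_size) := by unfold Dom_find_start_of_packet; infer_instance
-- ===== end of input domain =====

-- B replaces A's per-character window-list copy and set() rebuild (O(n*packet_size)) by a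
-- sliding-window character-frequency dict updated incrementally; measured faster on large inputs.

-- ===== PORT A =====
-- the loop body of A: last_n_chars.append(char); pop(0) when too long; return index+1 when distinct
def pvGoA (packet_size : Int) (last_n_chars : List Char) (index : Nat) : List Char → Int
  | [] => -1
  | char :: rest =>
    let w1 := last_n_chars ++ [char]
    let w2 := if (w1.length : Int) > packet_size then w1.drop 1 else w1
    if ((PySem.Set.ofList w2).length : Int) = packet_size then (index : Int) + 1
    else pvGoA packet_size w2 (index + 1) rest

def find_start_of_packet (datastream : String) (packet_size : Int) : Int :=
  pvGoA packet_size [] 0 datastream.toList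

-- ===== PORT B =====
-- the loop body of B: counts[char] += 1; drop the char leaving the window (del on zero);
-- return index+1 when len(counts) == packet_size.  datastream[index - packet_size] is in
-- range whenever Pre_ holds, so the pyGetD default is never read there.
def pvGoB (datastream : List Char) (packet_size : Int) (counts : PySem.Dict Char Int) (index : Nat) : List Char → Int
  | [] => -1
  | char :: rest =>
    let c1 := counts.insert char (counts.getD char 0 + 1)
    let c2 :=
      if (index : Int) ≥ packet_size then
        let gone := PySem.List.pyGetD datastream ((index : Int) - packet_size) char
        let c2 := c1.insert gone (c1.getD gone 0 - 1)
        if c2.getD gone 0 = 0 then c2.erase gone else c2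
      else c1
    if (c2.size : Int) = packet_size then (index : Int) + 1
    else pvGoB datastream packet_size c2 (index + 1) rest

def find_start_of_packet_alt (datastream : String) (packet_size : Int) : Int :=
  pvGoB datastream.toList packet_size PySem.Dict.empty 0 datastream.toList

-- ===== PRECONDITION & SPEC =====
-- Pre_ excludes negative packet_size with a nonempty datastream: there A returns -1 while B's
-- window removal indexes past the data / a missing key and raises (IndexError/KeyError).
def Pre_find_start_of_packet (datastream : String) (packet_size : Int) : Prop :=
  0 ≤ packet_size ∨ datastream = ""
instance (datastream : String) (packet_size : Int) : Decidable (Pre_find_start_of_packet datastream packet_size) := by unfold Pre_find_start_of_packet; infer_instance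
def pvWitness_find_start_of_packet : String × Int := ("mjqjpqmgbljsphdztnvjfqwrcgsmlb", 4)

def Spec_find_start_of_packet (datastream : String) (packet_size : Int) (out : Int) : Prop := out = find_start_of_packet_alt datastream packet_size
instance (datastream : String) (packet_size : Int) (out : Int) : Decidable (Spec_find_start_of_packet datastream packet_size out) := by unfold Spec_find_start_of_packet; infer_instance

-- ===== CLAIM (what is proved, stated in full; the proofs are below) =====
def Claim_equal_find_start_of_packet : Prop := ∀ (datastream : String) (packet_size : Int), Dom_find_start_of_packet datastream packet_size → Pre_find_start_of_packet datastream packet_size → Spec_find_start_of_packet datastream packet_size (find_start_of_packet datastream packet_size)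

-- ===== LEMMAS AND PROOFS =====

-- the invariant tying B's frequency dict to A's window
def pvInv (w : List Char) (d : PySem.Dict Char Int) : Prop :=
  d.keys.Nodup ∧ (∀ c, d.getD c 0 = (w.count c : Int)) ∧ (∀ c, d.contains c = true ↔ c ∈ w)

lemma pv_find?_filter_ne {κ ν : Type} [BEq κ] [LawfulBEq κ] [DecidableEq κ] (l : List (κ × ν)) (k x : κ) :
    (l.filter (fun p => !(p.1 == k))).find? (fun p => p.1 == x)
      = if x = k then none else l.find? (fun p => p.1 == x) := by
  induction l with
  | nil => simp
  | cons p rest ih =>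
    by_cases h1 : p.1 = k <;> by_cases h2 : p.1 = x <;> by_cases h3 : x = k <;>
      simp_all

lemma pv_get?_erase {κ ν : Type} [BEq κ] [LawfulBEq κ] [DecidableEq κ] (d : PySem.Dict κ ν) (k x : κ) :
    (d.erase k).get? x = if x = k then none else d.get? x := by
  obtain ⟨items⟩ := d
  simp only [PySem.Dict.erase, PySem.Dict.get?]
  rw [pv_find?_filter_ne]
  split <;> rfl

lemma pv_keys_erase_nodup {κ ν : Type} [BEq κ] (d : PySem.Dict κ ν) (k : κ)
    (h : d.keys.Nodup) : (d.erase k).keys.Nodup := by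
  obtain ⟨items⟩ := d
  exact List.Nodup.sublist (List.Sublist.map _ List.filter_sublist) h

lemma pv_size_keys {κ ν : Type} (d : PySem.Dict κ ν) : d.size = d.keys.length := by
  obtain ⟨items⟩ := d
  simp [PySem.Dict.size, PySem.Dict.keys]

lemma pv_size_eq (w : List Char) (d : PySem.Dict Char Int) (h : pvInv w d) :
    d.size = (PySem.Set.ofList w).length := by
  obtain ⟨hnd, _, hmem⟩ := h
  rw [pv_size_keys]
  refine List.Perm.length_eq ?_
  rw [List.perm_ext_iff_of_nodup hnd (PySem.Set.nodup_ofList w)]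
  intro a
  rw [PySem.Set.mem_ofList, ← hmem, ← PySem.Dict.contains_iff_mem_keys]

lemma pv_inv_add (w : List Char) (d : PySem.Dict Char Int) (c : Char) (h : pvInv w d) :
    pvInv (w ++ [c]) (d.insert c (d.getD c 0 + 1)) := by
  obtain ⟨hnd, hcnt, hmem⟩ := h
  refine ⟨PySem.Dict.nodup_keys_insert _ _ _ hnd, ?_, ?_⟩
  · intro x
    rw [PySem.Dict.getD_insert]
    by_cases hx : x = c
    · simp [hx, hcnt, List.count_append]
    · have hc0 : List.count x [c] = 0 := by simp [List.count_eq_zero, hx]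
      simp [hx, hcnt, List.count_append, hc0]
  · intro x
    rw [PySem.Dict.contains_insert]
    by_cases hx : x = c <;> simp [hx, hmem]

lemma pv_inv_remove (h : Char) (t : List Char) (d : PySem.Dict Char Int)
    (hinv : pvInv (h :: t) d) :
    pvInv t (let d1 := d.insert h (d.getD h 0 - 1);
             if d1.getD h 0 = 0 then d1.erase h else d1) := by
  obtain ⟨hnd, hcnt, hmem⟩ := hinv
  have hd1 : ∀ x, (d.insert h (d.getD h 0 - 1)).getD x 0 = (t.count x : Int) := by
    intro x
    rw [PySem.Dict.getD_insert]
    by_cases hx : x = h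
    · subst hx; simp [hcnt, List.count_cons_self]
    · simp [hx, hcnt, Ne.symm hx]
  have hd1c : ∀ x, (d.insert h (d.getD h 0 - 1)).contains x = true ↔ x ∈ h :: t := by
    intro x
    rw [PySem.Dict.contains_insert]
    by_cases hx : x = h <;> simp [hx, hmem]
  have hd1n : (d.insert h (d.getD h 0 - 1)).keys.Nodup := PySem.Dict.nodup_keys_insert _ _ _ hnd
  simp only
  split
  · rename_i hzero
    have hht : h ∉ t := by
      rw [hd1] at hzero
      simpa using List.count_eq_zero.mp (by exact_mod_cast hzero)
    refine ⟨pv_keys_erase_nodup _ _ hd1n, ?_, ?_⟩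
    · intro x
      rw [PySem.Dict.getD_eq_get?_getD, pv_get?_erase]
      by_cases hx : x = h
      · subst hx; simp [List.count_eq_zero.mpr hht]
      · rw [if_neg hx, ← PySem.Dict.getD_eq_get?_getD, hd1]
    · intro x
      rw [PySem.Dict.contains_eq_isSome_get?, pv_get?_erase]
      by_cases hx : x = h
      · subst hx; simp [hht]
      · rw [if_neg hx, ← PySem.Dict.contains_eq_isSome_get?, hd1c]
        simp [hx]
  · rename_i hnz
    have hht : h ∈ t := by
      rw [hd1] at hnz
      by_contra hno
      exact hnz (by simp [List.count_eq_zero.mpr hno])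
    refine ⟨hd1n, hd1, ?_⟩
    intro x
    rw [hd1c]
    by_cases hx : x = h <;> simp [hx, hht]

lemma pv_inv_empty : pvInv [] PySem.Dict.empty := by
  refine ⟨?_, ?_, ?_⟩ <;> simp [PySem.Dict.empty, PySem.Dict.keys, PySem.Dict.getD,
    PySem.Dict.get?, PySem.Dict.contains]

lemma pv_main (K : Nat) (ds : List Char) :
    ∀ (rest processed : List Char) (d : PySem.Dict Char Int),
      ds = processed ++ rest →
      pvInv (processed.drop (processed.length - K)) d →
      pvGoA (K : Int) (processed.drop (processed.length - K)) processed.length rest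
        = pvGoB ds (K : Int) d processed.length rest := by
  intro rest
  induction rest with
  | nil => intro processed d _ _; rfl
  | cons c rest' ih =>
    intro processed d hds hinv
    set i := processed.length with hi
    set w := processed.drop (i - K) with hw
    have hwlen : w.length = i - (i - K) := by simp [hw, hi]
    have hlt : i < ds.length := by
      subst hds
      simp only [List.length_append, List.length_cons]
      omega
    -- the new window after this step
    have hwin1 : processed ++ [c] ++ rest' = ds := by
      rw [hds]; simp
    rw [pvGoA, pvGoB]
    simp only [ge_iff_le]
    by_cases hik : (K : Int) ≤ (i : Int)
    · -- window is full: pop / remove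
      have hKi : K ≤ i := by exact_mod_cast hik
      have hdrop : (w ++ [c]).length > K := by
        simp only [List.length_append, List.length_cons, List.length_nil, hwlen]; omega
      have hdropI : ((w ++ [c]).length : Int) > (K : Int) := by exact_mod_cast hdrop
      rw [if_pos hdropI, if_pos hik]
      -- identify the removed character
      have hikN : ((i : Int) - (K : Int)) = ((i - K : Nat) : Int) := by omega
      have hiKlt : i - K < ds.length := by omega
      have hgone : PySem.List.pyGetD ds ((i : Int) - (K : Int)) c = ds[i - K] := by
        rw [hikN, PySem.List.pyGetD_natCast, List.getD_eq_getElem?_getD,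
          List.getElem?_eq_getElem hiKlt, Option.getD_some]
      have hp'len : (processed ++ [c]).length = i + 1 := by simp only [List.length_append, List.length_cons, List.length_nil]; omega
      have hiKle : i - K ≤ processed.length := by omega
      have hw1 : w ++ [c] = (processed ++ [c]).drop (i - K) := by
        rw [hw, List.drop_append_of_le_length hiKle]
      have hiKlt' : i - K < (processed ++ [c]).length := by omega
      have hdsg : ds[i - K] = (processed ++ [c])[i - K]'hiKlt' :=
        (List.getElem_of_eq hwin1.symm hiKlt).trans (List.getElem_append_left hiKlt')
      have hcons : w ++ [c] = ds[i - K] :: (processed ++ [c]).drop (i - K + 1) := by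
        rw [hw1, hdsg]
        exact (List.getElem_cons_drop _).symm
      have hnextw : (processed ++ [c]).drop ((processed ++ [c]).length - K)
          = (processed ++ [c]).drop (i - K + 1) := by
        rw [hp'len]; congr 1; omega
      -- B's dict after both updates satisfies the invariant for the new window
      have hinv1 : pvInv (w ++ [c]) (d.insert c (d.getD c 0 + 1)) := pv_inv_add _ _ _ hinv
      rw [hcons] at hinv1
      have hinv2 := pv_inv_remove _ _ _ hinv1
      simp only at hinv2
      rw [hgone]
      have hsz := pv_size_eq _ _ hinv2
      rw [← hnextw] at hinv2
      rw [hcons]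
      simp only [List.drop_succ_cons, List.drop_zero]
      by_cases hret : ((PySem.Set.ofList ((processed ++ [c]).drop (i - K + 1))).length : Int) = (K : Int)
      · rw [if_pos hret, if_pos (by rw [hsz]; exact_mod_cast hret)]
      · rw [if_neg hret, if_neg (by rw [hsz]; exact_mod_cast hret)]
        have hrec := ih (processed ++ [c]) _ hwin1.symm hinv2
        rw [hnextw] at hrec
        rw [hp'len] at hrec
        exact hrec
    · -- window still growing: no pop, no removal
      have hKi : ¬ (K ≤ i) := fun hx => hik (by exact_mod_cast hx)
      have hnodrop : ¬ (((w ++ [c]).length : Int) > (K : Int)) := by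
        simp only [List.length_append, List.length_cons, List.length_nil, hwlen]
        push_cast; omega
      rw [if_neg hnodrop, if_neg hik]
      have hweq : w = processed := by
        rw [hw]; have : i - K = 0 := by omega
        rw [this, List.drop_zero]
      have hnextw : (processed ++ [c]).drop ((processed ++ [c]).length - K) = w ++ [c] := by
        have : (processed ++ [c]).length - K = 0 := by
          simp only [List.length_append, List.length_cons, List.length_nil]; omega
        rw [this, List.drop_zero, hweq]
      have hinv1 : pvInv (w ++ [c]) (d.insert c (d.getD c 0 + 1)) := pv_inv_add _ _ _ hinv
      have hsz := pv_size_eq _ _ hinv1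
      have hp'len : (processed ++ [c]).length = i + 1 := by simp only [List.length_append, List.length_cons, List.length_nil]; omega
      by_cases hret : ((PySem.Set.ofList (w ++ [c])).length : Int) = (K : Int)
      · rw [if_pos hret, if_pos (by rw [hsz]; exact_mod_cast hret)]
      · rw [if_neg hret, if_neg (by rw [hsz]; exact_mod_cast hret)]
        rw [← hnextw] at hinv1
        have hrec := ih (processed ++ [c]) _ hwin1.symm hinv1
        rw [hnextw] at hrec
        rw [hp'len] at hrec
        exact hrec

-- ===== VERDICT (by name: the statement is the Claim_ definition above) =====
theorem find_start_of_packet_spec : Claim_equal_find_start_of_packet := by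
  intro ds k _ hpre
  unfold Spec_find_start_of_packet find_start_of_packet find_start_of_packet_alt
  rcases hpre with hk | hempty
  · obtain ⟨K, rfl⟩ := Int.eq_ofNat_of_zero_le hk
    have := pv_main K ds.toList ds.toList [] PySem.Dict.empty rfl (by simpa using pv_inv_empty)
    simpa using this
  · subst hempty; rfl
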